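-- pv_equiv track=rewrite | github.com/wujiel/recommend_new | EnvironmentSimulator.py | sum_positive_reward
-- ===== SOURCE A (Python) =====
-- def sum_positive_reward(rates_list):
--     sum = 0
--     for rate in rates_list:
--         if rate == 4:
--             sum += 1
--         if rate == 5:
--             sum += 2
--     return sum
-- ===== SOURCE B (Python) =====
-- def sum_positive_reward(rates_list):
--     return rates_list.count(4) + 2 * rates_list.count(5)
-- ===== Notes on version B (the rewrite author's own statement) =====
-- stated objective: simpler
-- what changed: Replaced the single accumulating two-branch loop with a one-line closed form using two independent full scans via list.count.
import Mathlib
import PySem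

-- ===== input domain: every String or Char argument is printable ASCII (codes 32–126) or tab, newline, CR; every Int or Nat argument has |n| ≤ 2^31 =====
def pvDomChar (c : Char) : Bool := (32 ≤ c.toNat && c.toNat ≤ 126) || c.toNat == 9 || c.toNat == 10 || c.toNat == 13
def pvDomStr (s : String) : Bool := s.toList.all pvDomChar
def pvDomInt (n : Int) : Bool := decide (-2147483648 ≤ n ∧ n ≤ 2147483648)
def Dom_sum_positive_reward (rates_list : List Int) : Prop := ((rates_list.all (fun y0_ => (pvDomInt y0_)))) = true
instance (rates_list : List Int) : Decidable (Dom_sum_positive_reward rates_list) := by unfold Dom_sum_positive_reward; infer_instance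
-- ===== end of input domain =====

-- B replaces A's single two-branch accumulating loop with a closed form over two
-- independent count scans (objective: simpler).

-- ===== PORT A =====
-- literal port of A's loop: fold carrying the accumulator, both ifs in order
def sum_positive_reward (rates_list : List Int) : Int :=
  rates_list.foldl (fun sum rate =>
    let sum := if rate == 4 then sum + 1 else sum
    if rate == 5 then sum + 2 else sum) 0

-- ===== PORT B =====
def sum_positive_reward_alt (rates_list : List Int) : Int :=
  PySem.List.count rates_list 4 + 2 * PySem.List.count rates_list 5

-- ===== PRECONDITION & SPEC =====
def Spec_sum_positive_reward (rates_list : List Int) (out : Int) : Prop := out = sum_positive_reward_alt rates_list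
instance (rates_list : List Int) (out : Int) : Decidable (Spec_sum_positive_reward rates_list out) := by unfold Spec_sum_positive_reward; infer_instance

-- ===== CLAIM (what is proved, stated in full; the proofs are below) =====
def Claim_equal_sum_positive_reward : Prop := ∀ (rates_list : List Int), Dom_sum_positive_reward rates_list → Spec_sum_positive_reward rates_list (sum_positive_reward rates_list)

-- ===== LEMMAS AND PROOFS =====
-- loop invariant: the fold from any accumulator equals the accumulator plus B's closed form
theorem sum_positive_reward_foldl (rates_list : List Int) (s : Int) :
    rates_list.foldl (fun sum rate =>
      let sum := if rate == 4 then sum + 1 else sum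
      if rate == 5 then sum + 2 else sum) s
    = s + PySem.List.count rates_list 4 + 2 * PySem.List.count rates_list 5 := by
  induction rates_list generalizing s with
  | nil => simp [PySem.List.count]
  | cons x xs ih =>
    simp only [List.foldl, PySem.List.count, List.count_cons, ih]
    by_cases h4 : x = 4 <;> by_cases h5 : x = 5 <;>
      simp [h4, h5] <;> ring

-- ===== VERDICT (by name: the statement is the Claim_ definition above) =====
theorem sum_positive_reward_spec : Claim_equal_sum_positive_reward := by
  intro rates_list _
  unfold Spec_sum_positive_reward sum_positive_reward sum_positive_reward_alt
  rw [sum_positive_reward_foldl]; ring
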